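-- pv_equiv track=rewrite | github.com/bssrdf/pyleet | C/ChessGame.py | isAttacked
-- ===== SOURCE A (Python) =====
-- def isAttacked(queen, knight):
--     # write your code here
--     # write your code here
--     n = len(queen)
--     m = len(knight)
--     Row = set()
--     Column = set()
--     Diagonal = set()
--     Diagonal2 = set()
--
--     for i in range(n):
--         Row.add(queen[i][0])
--         Column.add(queen[i][1])
--         Diagonal.add(queen[i][1] - queen[i][0])
--         Diagonal2.add(queen[i][1] + queen[i][0])
--
--     ans = [False] * m
--
--     for i in range(m):
--         if knight[i][0] in Row or knight[i][1] in Column or  \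
--            (knight[i][1] - knight[i][0]) in Diagonal  or  \
--            (knight[i][1] + knight[i][0]) in Diagonal2:
--                ans[i] = True
--
--     return ans
-- ===== SOURCE B (Python) =====
-- def isAttacked(queen, knight):
--     # Direct scan: for each knight, check every queen for shared row/column/diagonal.
--     return [any(q[0] == k[0] or q[1] == k[1] or
--                 q[1] - q[0] == k[1] - k[0] or
--                 q[1] + q[0] == k[1] + k[0] for q in queen)
--             for k in knight]
-- ===== Notes on version B (the rewrite author's own statement) =====
-- stated objective: simpler
-- what changed: Replaced the build-four-index-sets-then-lookup strategy with a single comprehension that, for each knight, scans the queens directly for a shared row, column or diagonal; Pre_ excludes inputs with an inner list shorter than 2, where A usually raises IndexError and may only return thanks to accidental short-circuiting that B's scan order does not share.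
-- outside the precondition, e.g. on isAttacked([[1, 0], [0, 5]], [[0]]): A returns [True], B raises IndexError
import Mathlib
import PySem

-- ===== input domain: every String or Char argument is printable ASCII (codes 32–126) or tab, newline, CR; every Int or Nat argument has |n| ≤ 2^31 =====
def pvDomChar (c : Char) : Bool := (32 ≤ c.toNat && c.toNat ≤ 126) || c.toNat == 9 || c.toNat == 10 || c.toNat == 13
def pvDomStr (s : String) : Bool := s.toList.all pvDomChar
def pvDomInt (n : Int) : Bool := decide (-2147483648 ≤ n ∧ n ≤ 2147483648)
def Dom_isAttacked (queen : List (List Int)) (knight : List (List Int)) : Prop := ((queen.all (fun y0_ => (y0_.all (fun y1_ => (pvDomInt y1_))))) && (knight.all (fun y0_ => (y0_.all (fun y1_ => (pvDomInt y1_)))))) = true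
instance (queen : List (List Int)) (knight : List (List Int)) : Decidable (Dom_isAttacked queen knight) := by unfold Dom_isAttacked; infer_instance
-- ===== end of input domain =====

-- B replaces A's four precomputed index sets by a direct per-knight scan of the queens (simpler, no index build).

-- ===== PORT A =====
-- builds the four sets Row/Column/Diagonal/Diagonal2, then fills ans = [False]*m by index
def isAttacked (queen : List (List Int)) (knight : List (List Int)) : List Bool :=
  let n : Int := queen.length
  let m : Int := knight.length
  let st := (PySem.List.pyRange 0 n 1).foldl
    (fun (st : PySem.Set Int × PySem.Set Int × PySem.Set Int × PySem.Set Int) i =>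
      let q := PySem.List.pyGetD queen i []
      (st.1.add (PySem.List.pyGetD q 0 0),
       st.2.1.add (PySem.List.pyGetD q 1 0),
       st.2.2.1.add (PySem.List.pyGetD q 1 0 - PySem.List.pyGetD q 0 0),
       st.2.2.2.add (PySem.List.pyGetD q 1 0 + PySem.List.pyGetD q 0 0)))
    (PySem.Set.empty, PySem.Set.empty, PySem.Set.empty, PySem.Set.empty)
  let ans : List Bool := List.replicate m.toNat false
  (PySem.List.pyRange 0 m 1).foldl
    (fun ans i =>
      let k := PySem.List.pyGetD knight i []
      if st.1.contains (PySem.List.pyGetD k 0 0) ||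
         st.2.1.contains (PySem.List.pyGetD k 1 0) ||
         st.2.2.1.contains (PySem.List.pyGetD k 1 0 - PySem.List.pyGetD k 0 0) ||
         st.2.2.2.contains (PySem.List.pyGetD k 1 0 + PySem.List.pyGetD k 0 0)
      then PySem.List.pySetD ans i true else ans)
    ans

-- ===== PORT B =====
def isAttacked_alt (queen : List (List Int)) (knight : List (List Int)) : List Bool :=
  knight.map (fun k =>
    queen.any (fun q =>
      PySem.List.pyGetD q 0 0 == PySem.List.pyGetD k 0 0 ||
      PySem.List.pyGetD q 1 0 == PySem.List.pyGetD k 1 0 ||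
      PySem.List.pyGetD q 1 0 - PySem.List.pyGetD q 0 0 ==
        PySem.List.pyGetD k 1 0 - PySem.List.pyGetD k 0 0 ||
      PySem.List.pyGetD q 1 0 + PySem.List.pyGetD q 0 0 ==
        PySem.List.pyGetD k 1 0 + PySem.List.pyGetD k 0 0))

-- ===== PRECONDITION & SPEC =====
-- Pre_ excludes inputs with an inner list shorter than 2: on these the Python A usually raises
-- IndexError, and the few cases where it still returns (a length-1 knight row whose [0] hits an
-- index set before [1] is evaluated) are accidents of `or`-short-circuiting that B's direct scan
-- order does not reproduce (B raises there).
def Pre_isAttacked (queen : List (List Int)) (knight : List (List Int)) : Prop :=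
  (∀ q ∈ queen, 2 ≤ q.length) ∧ (∀ k ∈ knight, 2 ≤ k.length)
instance (queen : List (List Int)) (knight : List (List Int)) : Decidable (Pre_isAttacked queen knight) := by unfold Pre_isAttacked; infer_instance
def pvWitness_isAttacked : List (List Int) × List (List Int) := ([[0, 0], [2, 3]], [[1, 1], [0, 5]])
def Spec_isAttacked (queen : List (List Int)) (knight : List (List Int)) (out : List Bool) : Prop := out = isAttacked_alt queen knight
instance (queen : List (List Int)) (knight : List (List Int)) (out : List Bool) : Decidable (Spec_isAttacked queen knight out) := by unfold Spec_isAttacked; infer_instance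

-- ===== CLAIM (what is proved, stated in full; the proofs are below) =====
def Claim_equal_isAttacked : Prop := ∀ (queen : List (List Int)) (knight : List (List Int)), Dom_isAttacked queen knight → Pre_isAttacked queen knight → Spec_isAttacked queen knight (isAttacked queen knight)

-- ===== LEMMAS AND PROOFS =====

theorem contains_add (s : PySem.Set Int) (x y : Int) :
    (PySem.Set.add s x).contains y = (s.contains y || x == y) := by
  unfold PySem.Set.add
  by_cases hm : x ∈ s
  · rw [if_pos (by simpa using hm)]
    cases hc : s.contains y
    · have hxy : x ≠ y := fun h => by subst h; simp_all [PySem.Set.contains]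
      simp [hxy]
    · simp
  · rw [if_neg (by simpa using hm)]
    simp only [PySem.Set.contains_eq_listContains]
    by_cases hxy : x = y
    · subst hxy; simp
    · rw [Bool.eq_iff_iff]; simp [hxy, Ne.symm hxy]

theorem fold4_contains (queen : List (List Int)) (R C D E : PySem.Set Int) (k0 k1 : Int) :
    (let st := queen.foldl
      (fun (st : PySem.Set Int × PySem.Set Int × PySem.Set Int × PySem.Set Int) q =>
        (st.1.add (PySem.List.pyGetD q 0 0),
         st.2.1.add (PySem.List.pyGetD q 1 0),
         st.2.2.1.add (PySem.List.pyGetD q 1 0 - PySem.List.pyGetD q 0 0),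
         st.2.2.2.add (PySem.List.pyGetD q 1 0 + PySem.List.pyGetD q 0 0))) (R, C, D, E)
     st.1.contains k0 || st.2.1.contains k1 || st.2.2.1.contains (k1 - k0) ||
       st.2.2.2.contains (k1 + k0)) =
    (R.contains k0 || C.contains k1 || D.contains (k1 - k0) || E.contains (k1 + k0) ||
      queen.any (fun q =>
        PySem.List.pyGetD q 0 0 == k0 || PySem.List.pyGetD q 1 0 == k1 ||
        PySem.List.pyGetD q 1 0 - PySem.List.pyGetD q 0 0 == k1 - k0 ||
        PySem.List.pyGetD q 1 0 + PySem.List.pyGetD q 0 0 == k1 + k0)) := by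
  induction queen generalizing R C D E with
  | nil => simp
  | cons q qs ih =>
    simp only [List.foldl_cons, List.any_cons]
    rw [ih]
    simp only [contains_add]
    cases R.contains k0 <;> cases C.contains k1 <;> cases D.contains (k1 - k0) <;>
      cases E.contains (k1 + k0) <;>
      cases hb1 : (PySem.List.pyGetD q 0 0 == k0) <;>
      cases hb2 : (PySem.List.pyGetD q 1 0 == k1) <;>
      cases hb3 : (PySem.List.pyGetD q 1 0 - PySem.List.pyGetD q 0 0 == k1 - k0) <;>
      cases hb4 : (PySem.List.pyGetD q 1 0 + PySem.List.pyGetD q 0 0 == k1 + k0) <;>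
      simp

theorem loop2 (g : List Int → Bool) (knight : List (List Int)) (a : Nat) (pre : List Bool)
    (hp : pre.length = a) (ha : a ≤ knight.length) :
    (PySem.List.pyRange (a : Int) (knight.length : Int)).foldl
      (fun ans i =>
        if g (PySem.List.pyGetD knight i []) then PySem.List.pySetD ans i true else ans)
      (pre ++ List.replicate (knight.length - a) false)
    = pre ++ (knight.drop a).map g := by
  by_cases h : a < knight.length
  · rw [PySem.List.pyRange_one_cons (by exact_mod_cast h)]
    simp only [List.foldl_cons]
    have hget : PySem.List.pyGetD knight (a : Int) [] = knight[a] := by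
      rw [PySem.List.pyGetD_eq_getElem knight [] (by positivity) (by exact_mod_cast h)]
      simp
    have hrep : List.replicate (knight.length - a) false
        = false :: List.replicate (knight.length - (a + 1)) false := by
      rw [← List.replicate_succ]; congr 1; omega
    have hsplit : pre ++ List.replicate (knight.length - a) false
        = (pre ++ [false]) ++ List.replicate (knight.length - (a + 1)) false := by
      rw [hrep]; simp
    have hset : PySem.List.pySetD (pre ++ List.replicate (knight.length - a) false) (a : Int) true
        = (pre ++ [true]) ++ List.replicate (knight.length - (a + 1)) false := by
      rw [PySem.List.pySetD_natCast, hsplit, List.append_assoc,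
        List.set_append_right _ _ (by simp [hp])]
      simp [hp]
    have step : (if g (PySem.List.pyGetD knight (a : Int) [])
          then PySem.List.pySetD (pre ++ List.replicate (knight.length - a) false) (a : Int) true
          else pre ++ List.replicate (knight.length - a) false)
        = (pre ++ [g knight[a]]) ++ List.replicate (knight.length - (a + 1)) false := by
      rw [hget]
      cases hg : g knight[a]
      · rw [if_neg (by simp), hsplit]
      · rw [if_pos rfl]; exact hset
    rw [step]
    have ih := loop2 g knight (a + 1) (pre ++ [g knight[a]]) (by simp [hp]) (by omega)
    rw [show ((a : Int) + 1) = ((a + 1 : Nat) : Int) by push_cast; ring]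
    rw [ih, List.append_assoc]
    congr 1
    have hd : List.drop a (List.map g knight) = g knight[a] :: List.drop (a + 1) (List.map g knight) := by
      rw [List.drop_eq_getElem_cons (show a < (List.map g knight).length by simpa using h)]
      simp
    simp [hd]
  · have he : a = knight.length := by omega
    subst he
    rw [PySem.List.pyRange_one_eq_nil (by omega)]
    simp
termination_by knight.length - a

-- ===== VERDICT (by name: the statement is the Claim_ definition above) =====
theorem isAttacked_spec : Claim_equal_isAttacked := by
  intro queen knight _ _
  show isAttacked queen knight = isAttacked_alt queen knight
  simp only [isAttacked, isAttacked_alt]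
  rw [show ((queen.length : Int)) = PySem.List.len queen from rfl,
    PySem.List.foldl_pyRange_zero_pyGetD queen []
      (fun (st : PySem.Set Int × PySem.Set Int × PySem.Set Int × PySem.Set Int) q =>
        (st.1.add (PySem.List.pyGetD q 0 0),
         st.2.1.add (PySem.List.pyGetD q 1 0),
         st.2.2.1.add (PySem.List.pyGetD q 1 0 - PySem.List.pyGetD q 0 0),
         st.2.2.2.add (PySem.List.pyGetD q 1 0 + PySem.List.pyGetD q 0 0)))
      (PySem.Set.empty, PySem.Set.empty, PySem.Set.empty, PySem.Set.empty)]
  have hl := loop2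
      (fun kk =>
        (List.foldl
          (fun (st : PySem.Set Int × PySem.Set Int × PySem.Set Int × PySem.Set Int) q =>
            (st.1.add (PySem.List.pyGetD q 0 0),
             st.2.1.add (PySem.List.pyGetD q 1 0),
             st.2.2.1.add (PySem.List.pyGetD q 1 0 - PySem.List.pyGetD q 0 0),
             st.2.2.2.add (PySem.List.pyGetD q 1 0 + PySem.List.pyGetD q 0 0)))
          (PySem.Set.empty, PySem.Set.empty, PySem.Set.empty, PySem.Set.empty) queen).1.contains
            (PySem.List.pyGetD kk 0 0) ||
        (List.foldl
          (fun (st : PySem.Set Int × PySem.Set Int × PySem.Set Int × PySem.Set Int) q =>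
            (st.1.add (PySem.List.pyGetD q 0 0),
             st.2.1.add (PySem.List.pyGetD q 1 0),
             st.2.2.1.add (PySem.List.pyGetD q 1 0 - PySem.List.pyGetD q 0 0),
             st.2.2.2.add (PySem.List.pyGetD q 1 0 + PySem.List.pyGetD q 0 0)))
          (PySem.Set.empty, PySem.Set.empty, PySem.Set.empty, PySem.Set.empty) queen).2.1.contains
            (PySem.List.pyGetD kk 1 0) ||
        (List.foldl
          (fun (st : PySem.Set Int × PySem.Set Int × PySem.Set Int × PySem.Set Int) q =>
            (st.1.add (PySem.List.pyGetD q 0 0),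
             st.2.1.add (PySem.List.pyGetD q 1 0),
             st.2.2.1.add (PySem.List.pyGetD q 1 0 - PySem.List.pyGetD q 0 0),
             st.2.2.2.add (PySem.List.pyGetD q 1 0 + PySem.List.pyGetD q 0 0)))
          (PySem.Set.empty, PySem.Set.empty, PySem.Set.empty, PySem.Set.empty) queen).2.2.1.contains
            (PySem.List.pyGetD kk 1 0 - PySem.List.pyGetD kk 0 0) ||
        (List.foldl
          (fun (st : PySem.Set Int × PySem.Set Int × PySem.Set Int × PySem.Set Int) q =>
            (st.1.add (PySem.List.pyGetD q 0 0),
             st.2.1.add (PySem.List.pyGetD q 1 0),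
             st.2.2.1.add (PySem.List.pyGetD q 1 0 - PySem.List.pyGetD q 0 0),
             st.2.2.2.add (PySem.List.pyGetD q 1 0 + PySem.List.pyGetD q 0 0)))
          (PySem.Set.empty, PySem.Set.empty, PySem.Set.empty, PySem.Set.empty) queen).2.2.2.contains
            (PySem.List.pyGetD kk 1 0 + PySem.List.pyGetD kk 0 0))
      knight 0 [] rfl (Nat.zero_le _)
  simp only [Nat.cast_zero, Nat.sub_zero, List.nil_append, List.drop_zero] at hl
  rw [show ((knight.length : Int)).toNat = knight.length by simp]
  rw [hl]
  refine List.map_congr_left (fun k _ => ?_)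
  have h4 := fold4_contains queen PySem.Set.empty PySem.Set.empty PySem.Set.empty PySem.Set.empty
    (PySem.List.pyGetD k 0 0) (PySem.List.pyGetD k 1 0)
  simp only [] at h4
  rw [h4]
  cases queen.any _ <;> simp [PySem.Set.contains, PySem.Set.empty]
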